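-- pv_equiv track=rewrite | github.com/jmknapp/congressional-coalitions | scripts/cross_party_coordination.py | party_majorities
-- ===== SOURCE A (Python) =====
-- def party_majorities(votes_for_rc):
--     """Compute each party's majority vote ('Yea'/'Nay'/None for tie) for a rollcall."""
--     out = {'D': None, 'R': None}
--     for p in ('D', 'R'):
--         yea = sum(1 for _, party, c in votes_for_rc if party == p and c == 'Yea')
--         nay = sum(1 for _, party, c in votes_for_rc if party == p and c == 'Nay')
--         if yea > nay:
--             out[p] = 'Yea'
--         elif nay > yea:
--             out[p] = 'Nay'
--         else:
--             out[p] = None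
--     return out
-- ===== SOURCE B (Python) =====
-- def party_majorities(votes_for_rc):
--     """Compute each party's majority vote ('Yea'/'Nay'/None for tie) for a rollcall."""
--     counts = {'D': (0, 0), 'R': (0, 0)}
--     for _, party, c in votes_for_rc:
--         if party in counts:
--             yea, nay = counts[party]
--             if c == 'Yea':
--                 counts[party] = (yea + 1, nay)
--             elif c == 'Nay':
--                 counts[party] = (yea, nay + 1)
--     out = {}
--     for p in ('D', 'R'):
--         yea, nay = counts[p]
--         out[p] = 'Yea' if yea > nay else ('Nay' if nay > yea else None)
--     return out
-- ===== Notes on version B (the rewrite author's own statement) =====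
-- stated objective: simpler
-- what changed: One pass over the votes builds a tally table of (yea, nay) per party, then a resolution pass decides each majority, replacing A's four separate filtered sum-scans of the list.
import Mathlib
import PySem

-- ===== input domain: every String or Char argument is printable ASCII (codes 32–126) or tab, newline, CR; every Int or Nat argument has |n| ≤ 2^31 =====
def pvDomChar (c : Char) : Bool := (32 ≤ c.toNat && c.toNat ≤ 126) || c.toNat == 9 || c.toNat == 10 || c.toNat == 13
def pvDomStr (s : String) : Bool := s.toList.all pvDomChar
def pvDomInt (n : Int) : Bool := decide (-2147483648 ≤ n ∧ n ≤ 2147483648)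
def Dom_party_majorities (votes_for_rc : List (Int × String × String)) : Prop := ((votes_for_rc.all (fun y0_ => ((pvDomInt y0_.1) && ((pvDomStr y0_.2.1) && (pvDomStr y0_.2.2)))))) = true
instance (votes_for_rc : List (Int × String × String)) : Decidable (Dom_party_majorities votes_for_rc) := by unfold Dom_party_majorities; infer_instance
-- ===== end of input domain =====

-- B replaces A's four filtered sum-scans of the vote list by one tallying pass plus a resolution pass (objective: simpler).

-- ===== PORT A =====
-- A: for each party p in ('D','R'), two generator sums over the whole list, then compare.
def party_majorities (votes_for_rc : List (Int × String × String)) : List (String × Option String) :=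
  (["D", "R"].foldl (fun out p =>
      let yea : Int := ((votes_for_rc.filter (fun t => t.2.1 == p && t.2.2 == "Yea")).length : Int)
      let nay : Int := ((votes_for_rc.filter (fun t => t.2.1 == p && t.2.2 == "Nay")).length : Int)
      PySem.Dict.insert out p
        (if yea > nay then some "Yea" else if nay > yea then some "Nay" else none))
    (PySem.Dict.ofList [("D", (none : Option String)), ("R", none)])).items

-- ===== PORT B =====
-- B: one pass building a (yea, nay) tally per party, then a resolution pass over ('D','R').
def party_majorities_alt (votes_for_rc : List (Int × String × String)) : List (String × Option String) :=
  let counts : PySem.Dict String (Int × Int) :=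
    votes_for_rc.foldl (fun d t =>
        if d.contains t.2.1 then
          let yn := d.getD t.2.1 (0, 0)
          if t.2.2 == "Yea" then d.insert t.2.1 (yn.1 + 1, yn.2)
          else if t.2.2 == "Nay" then d.insert t.2.1 (yn.1, yn.2 + 1)
          else d
        else d)
      (PySem.Dict.ofList [("D", ((0 : Int), (0 : Int))), ("R", (0, 0))])
  (["D", "R"].foldl (fun out p =>
      let yn := counts.getD p (0, 0)
      PySem.Dict.insert out p
        (if yn.1 > yn.2 then some "Yea" else if yn.2 > yn.1 then some "Nay" else none))
    PySem.Dict.empty).items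

-- ===== PRECONDITION & SPEC =====
def Spec_party_majorities (votes_for_rc : List (Int × String × String)) (out : List (String × Option String)) : Prop := out = party_majorities_alt votes_for_rc
instance (votes_for_rc : List (Int × String × String)) (out : List (String × Option String)) : Decidable (Spec_party_majorities votes_for_rc out) := by unfold Spec_party_majorities; infer_instance

-- ===== CLAIM (what is proved, stated in full; the proofs are below) =====
def Claim_equal_party_majorities : Prop := ∀ (votes_for_rc : List (Int × String × String)), Dom_party_majorities votes_for_rc → Spec_party_majorities votes_for_rc (party_majorities votes_for_rc)

-- ===== LEMMAS AND PROOFS =====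

-- The tally fold, at any key p the starting dict contains, accumulates the filtered Yea/Nay counts.
theorem tally_getD (votes_for_rc : List (Int × String × String))
    (d : PySem.Dict String (Int × Int)) (p : String) (hp : d.contains p = true) :
    (votes_for_rc.foldl (fun d t =>
        if d.contains t.2.1 then
          let yn := d.getD t.2.1 (0, 0)
          if t.2.2 == "Yea" then d.insert t.2.1 (yn.1 + 1, yn.2)
          else if t.2.2 == "Nay" then d.insert t.2.1 (yn.1, yn.2 + 1)
          else d
        else d) d).getD p (0, 0)
      = ((d.getD p (0, 0)).1 + ((votes_for_rc.filter (fun t => t.2.1 == p && t.2.2 == "Yea")).length : Int),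
         (d.getD p (0, 0)).2 + ((votes_for_rc.filter (fun t => t.2.1 == p && t.2.2 == "Nay")).length : Int)) := by
  induction votes_for_rc generalizing d with
  | nil => simp
  | cons t rest ih =>
    simp only [List.foldl_cons, List.filter_cons]
    by_cases hpt : t.2.1 = p
    · subst hpt
      rw [if_pos hp]
      by_cases hy : t.2.2 = "Yea"
      · simp only [hy]
        rw [ih _ (by simp)]
        simp
        omega
      · by_cases hn : t.2.2 = "Nay"
        · simp only [hn]
          have hneq : ("Nay" == "Yea") = false := by decide
          simp only [hneq, Bool.false_eq_true, if_false, beq_self_eq_true, if_true]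
          rw [ih _ (by simp)]
          simp
          omega
        · have hy' : (t.2.2 == "Yea") = false := by simp [hy]
          have hn' : (t.2.2 == "Nay") = false := by simp [hn]
          simp only [hy', hn', Bool.false_eq_true, if_false]
          rw [ih _ hp]
          simp
    · have hne : (t.2.1 == p) = false := by simp [hpt]
      simp only [hne, Bool.false_and, Bool.false_eq_true, if_false]
      split_ifs with h1 h2 h3
      · rw [ih _ (by rw [PySem.Dict.contains_insert]; simp [hp]), PySem.Dict.getD_insert_of_ne _ _ _ (Ne.symm hpt)]
      · rw [ih _ (by rw [PySem.Dict.contains_insert]; simp [hp]), PySem.Dict.getD_insert_of_ne _ _ _ (Ne.symm hpt)]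
      · rw [ih _ hp]
      · rw [ih _ hp]

-- The resolution/output pass of each port yields the literal two-entry items list.
theorem itemsA (x y : Option String) :
    (((PySem.Dict.ofList [("D", (none : Option String)), ("R", none)]).insert "D" x).insert "R" y).items
      = [("D", x), ("R", y)] := rfl

theorem itemsB (x y : Option String) :
    (((PySem.Dict.empty : PySem.Dict String (Option String)).insert "D" x).insert "R" y).items
      = [("D", x), ("R", y)] := rfl

theorem getD0_D : (PySem.Dict.ofList [("D", ((0 : Int), (0 : Int))), ("R", (0, 0))]).getD "D" (0, 0) = (0, 0) := by decide
theorem getD0_R : (PySem.Dict.ofList [("D", ((0 : Int), (0 : Int))), ("R", (0, 0))]).getD "R" (0, 0) = (0, 0) := by decide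

-- ===== VERDICT (by name: the statement is the Claim_ definition above) =====
theorem party_majorities_spec : Claim_equal_party_majorities := by
  intro v _
  unfold Spec_party_majorities party_majorities party_majorities_alt
  have hD := tally_getD v (PySem.Dict.ofList [("D", ((0 : Int), (0 : Int))), ("R", (0, 0))]) "D" (by decide)
  have hR := tally_getD v (PySem.Dict.ofList [("D", ((0 : Int), (0 : Int))), ("R", (0, 0))]) "R" (by decide)
  rw [getD0_D] at hD
  rw [getD0_R] at hR
  simp only [List.foldl_cons, List.foldl_nil]
  rw [hD, hR]
  simp only [zero_add, Nat.cast_lt, gt_iff_lt]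
  rw [itemsA, itemsB]
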